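-- pv_equiv track=rewrite | github.com/6210qwe/leetcode_py | leetcode_solutions/by_id/q1818.py | max_score_from_removing_substrings
-- ===== SOURCE A (Python) =====
-- def max_score_from_removing_substrings(s: str, x: int, y: int) -> int:
--     """
--     函数式接口 - 计算删除子字符串的最大得分
--     """
--     def remove_substrings(s: str, sub: str, score: int) -> (str, int):
--         stack = []
--         total_score = 0
--         for char in s:
--             if stack and stack[-1] + char == sub:
--                 stack.pop()
--                 total_score += score
--             else:
--                 stack.append(char)
--         return ''.join(stack), total_score
--
--     if x >= y:
--         s, score_ab = remove_substrings(s, "ab", x)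
--         s, score_ba = remove_substrings(s, "ba", y)
--     else:
--         s, score_ba = remove_substrings(s, "ba", y)
--         s, score_ab = remove_substrings(s, "ab", x)
--
--     return score_ab + score_ba
-- ===== SOURCE B (Python) =====
-- def max_score_from_removing_substrings(s: str, x: int, y: int) -> int:
--     # Two-counter single pass instead of stacks: count unmatched first/second
--     # letters of the high pair; flush min(p,q)*low at barriers and at the end.
--     if x >= y:
--         first, second, hi, lo = 'a', 'b', x, y
--     else:
--         first, second, hi, lo = 'b', 'a', y, x
--     p = q = 0
--     sc = 0
--     for ch in s:
--         if ch == first: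
--             p += 1
--         elif ch == second:
--             if p > 0:
--                 sc += hi
--                 p -= 1
--             else:
--                 q += 1
--         else:
--             sc += min(p, q) * lo
--             p = q = 0
--     return sc + min(p, q) * lo
-- ===== Notes on version B (the rewrite author's own statement) =====
-- stated objective: simpler
-- what changed: Replaces A's two sequential stack passes (build a residual string, then rescan it) with a single pass over s keeping two integer counters for unmatched letters of the high-scoring pair, flushing min(p,q)*low at non-'a'/'b' barriers and at the end.
import Mathlib
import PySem

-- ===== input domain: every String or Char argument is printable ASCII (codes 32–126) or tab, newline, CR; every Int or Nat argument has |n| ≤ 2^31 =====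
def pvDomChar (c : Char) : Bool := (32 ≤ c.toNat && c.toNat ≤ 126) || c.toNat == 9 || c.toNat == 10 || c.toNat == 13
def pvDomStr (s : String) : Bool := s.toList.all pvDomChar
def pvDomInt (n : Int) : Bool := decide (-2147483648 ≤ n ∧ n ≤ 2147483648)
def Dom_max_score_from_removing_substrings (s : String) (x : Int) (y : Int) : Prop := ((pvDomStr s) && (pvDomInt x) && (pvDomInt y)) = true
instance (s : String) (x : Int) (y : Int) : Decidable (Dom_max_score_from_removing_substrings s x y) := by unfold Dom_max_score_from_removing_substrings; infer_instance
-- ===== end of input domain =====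

-- B replaces A's two stack passes with a single two-counter pass (simpler, one traversal).


-- ===== PORT A =====
-- stack is kept head-as-top; ''.join(stack) is stack.reverse
def rsLoop (sub : String) (score : Int) : List Char → List Char → Int → List Char × Int
  | [], stack, total => (stack, total)
  | ch :: t, stack, total =>
    match stack with
    | c :: rest =>
      if String.ofList [c, ch] = sub then rsLoop sub score t rest (total + score)
      else rsLoop sub score t (ch :: stack) total
    | [] => rsLoop sub score t [ch] total

def removeSubstrings (s : List Char) (sub : String) (score : Int) : List Char × Int :=
  let r := rsLoop sub score s [] 0
  (r.1.reverse, r.2)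

def max_score_from_removing_substrings (s : String) (x : Int) (y : Int) : Int :=
  if x ≥ y then
    let r1 := removeSubstrings s.toList "ab" x
    let r2 := removeSubstrings r1.1 "ba" y
    r1.2 + r2.2
  else
    let r1 := removeSubstrings s.toList "ba" y
    let r2 := removeSubstrings r1.1 "ab" x
    r2.2 + r1.2

-- ===== PORT B =====
def bLoop (first second : Char) (hi lo : Int) : List Char → Nat → Nat → Int → Int
  | [], p, q, sc => sc + (min p q : Int) * lo
  | ch :: t, p, q, sc =>
    if ch = first then bLoop first second hi lo t (p + 1) q sc
    else if ch = second then
      if 0 < p then bLoop first second hi lo t (p - 1) q (sc + hi)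
      else bLoop first second hi lo t p (q + 1) sc
    else bLoop first second hi lo t 0 0 (sc + (min p q : Int) * lo)

def max_score_from_removing_substrings_alt (s : String) (x : Int) (y : Int) : Int :=
  if x ≥ y then bLoop 'a' 'b' x y s.toList 0 0 0
  else bLoop 'b' 'a' y x s.toList 0 0 0

-- ===== PRECONDITION & SPEC =====
def Spec_max_score_from_removing_substrings (s : String) (x : Int) (y : Int) (out : Int) : Prop := out = max_score_from_removing_substrings_alt s x y
instance (s : String) (x : Int) (y : Int) (out : Int) : Decidable (Spec_max_score_from_removing_substrings s x y out) := by unfold Spec_max_score_from_removing_substrings; infer_instance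

-- ===== CLAIM (what is proved, stated in full; the proofs are below) =====
def Claim_equal_max_score_from_removing_substrings : Prop := ∀ (s : String) (x : Int) (y : Int), Dom_max_score_from_removing_substrings s x y → Spec_max_score_from_removing_substrings s x y (max_score_from_removing_substrings s x y)

-- ===== LEMMAS AND PROOFS =====

-- the stack between barriers after the high pass is always c1^p c2^q over barrier-separated blocks
inductive Good (c1 c2 : Char) : List Char → Prop
  | nil : Good c1 c2 []
  | cons (d : Char) (p q : Nat) (base : List Char) :
      d ≠ c1 → d ≠ c2 → Good c1 c2 base →
      Good c1 c2 (d :: (List.replicate p c1 ++ List.replicate q c2 ++ base))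

lemma pairEq (a b c d : Char) : (String.ofList [a, b] = String.ofList [c, d]) ↔ (a = c ∧ b = d) := by
  rw [String.ofList_inj]; simp

lemma rs_append (sub : String) (sc : Int) (u v st : List Char) (tot : Int) :
    rsLoop sub sc (u ++ v) st tot
      = rsLoop sub sc v (rsLoop sub sc u st tot).1 (rsLoop sub sc u st tot).2 := by
  induction u generalizing st tot with
  | nil => simp [rsLoop]
  | cons ch t ih =>
    cases st with
    | nil => simp only [List.cons_append, rsLoop]; exact ih _ _
    | cons c r =>
      simp only [List.cons_append, rsLoop]
      split <;> exact ih _ _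


lemma rep_cons (k : Nat) (c : Char) (st : List Char) :
    List.replicate k c ++ c :: st = c :: (List.replicate k c ++ st) := by
  rw [← List.singleton_append, ← List.append_assoc, ← List.replicate_succ',
      List.replicate_succ, List.cons_append]

lemma rs_push_step (c1 c2 ch : Char) (sc : Int) (h : ch ≠ c2) (t st : List Char) (tot : Int) :
    rsLoop (String.ofList [c1, c2]) sc (ch :: t) st tot
      = rsLoop (String.ofList [c1, c2]) sc t (ch :: st) tot := by
  cases st with
  | nil => simp [rsLoop]
  | cons c r => simp [rsLoop, pairEq, h]

lemma rs_push_step2 (c1 c2 ch : Char) (sc : Int) (t st : List Char) (tot : Int)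
    (h : st.head? ≠ some c1) :
    rsLoop (String.ofList [c1, c2]) sc (ch :: t) st tot
      = rsLoop (String.ofList [c1, c2]) sc t (ch :: st) tot := by
  cases st with
  | nil => simp [rsLoop]
  | cons c r =>
    have hc : c ≠ c1 := by simpa using h
    simp [rsLoop, pairEq, hc]

lemma rs_pop_step (c1 c2 : Char) (sc : Int) (t r : List Char) (tot : Int) :
    rsLoop (String.ofList [c1, c2]) sc (c2 :: t) (c1 :: r) tot
      = rsLoop (String.ofList [c1, c2]) sc t r (tot + sc) := by
  simp [rsLoop]

lemma rs2_pushrep (c1 c2 : Char) (lo : Int) (h : c2 ≠ c1) (q : Nat) (v st : List Char) (tot : Int) :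
    rsLoop (String.ofList [c2, c1]) lo (List.replicate q c2 ++ v) st tot
      = rsLoop (String.ofList [c2, c1]) lo v (List.replicate q c2 ++ st) tot := by
  induction q generalizing st with
  | zero => simp
  | succ n ih =>
    rw [List.replicate_succ, List.cons_append, rs_push_step c2 c1 c2 lo h, ih]
    congr 1
    rw [rep_cons n c2 st]; rfl

lemma rs2_consume (c1 c2 : Char) (lo : Int) (h12 : c1 ≠ c2) (p : Nat) :
    ∀ (q : Nat) (v st : List Char) (tot : Int), st.head? ≠ some c2 →
    rsLoop (String.ofList [c2, c1]) lo (List.replicate p c1 ++ v) (List.replicate q c2 ++ st) tot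
      = rsLoop (String.ofList [c2, c1]) lo v
          ((if p ≤ q then List.replicate (q - p) c2 else List.replicate (p - q) c1) ++ st)
          (tot + ((min p q : Nat) : Int) * lo) := by
  induction p with
  | zero => intro q v st tot h; simp
  | succ n ih =>
    intro q v st tot h
    cases q with
    | zero =>
      rw [List.replicate_zero, List.nil_append]
      rw [List.replicate_succ, List.cons_append, rs_push_step2 c2 c1 c1 lo _ st tot h]
      have h' : (c1 :: st).head? ≠ some c2 := by simp [h12]
      have := ih 0 v (c1 :: st) tot h'
      simp only [List.replicate_zero, List.nil_append] at this
      rw [this]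
      have hmin0 : min n 0 = 0 := Nat.min_zero n
      have hmin1 : min (n + 1) 0 = 0 := Nat.min_zero (n + 1)
      rw [hmin0, hmin1]
      congr 1
      by_cases hn : n ≤ 0
      · have : n = 0 := Nat.le_zero.mp hn
        subst this; simp
      · simp only [if_neg hn, if_neg (by omega : ¬ n + 1 ≤ 0)]
        have hr : List.replicate n c1 ++ c1 :: st = List.replicate (n + 1) c1 ++ st := by
          rw [rep_cons, List.replicate_succ, List.cons_append]
        simp [hr]
    | succ m =>
      rw [List.replicate_succ (n := n), List.cons_append,
          List.replicate_succ (n := m), List.cons_append,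
          rs_pop_step c2 c1 lo]
      rw [ih m v st (tot + lo) h]
      have hif : (if n ≤ m then List.replicate (m - n) c2 else List.replicate (n - m) c1)
          = (if n + 1 ≤ m + 1 then List.replicate (m + 1 - (n + 1)) c2
             else List.replicate (n + 1 - (m + 1)) c1) := by
        by_cases hnm : n ≤ m
        · simp [hnm, Nat.succ_le_succ hnm]
        · simp [hnm, fun hh => hnm (Nat.le_of_succ_le_succ hh)]
      rw [hif]
      congr 1
      have hm : min (n + 1) (m + 1) = min n m + 1 := by omega
      rw [hm]
      push_cast
      ring

lemma rs2_base (c1 c2 : Char) (lo : Int) (h12 : c1 ≠ c2) {base : List Char}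
    (hb : Good c1 c2 base) :
    ∃ T S, ∀ st tot, st.head? ≠ some c2 →
      rsLoop (String.ofList [c2, c1]) lo base.reverse st tot = (T ++ st, tot + S)
        ∧ (T ++ st).head? ≠ some c2 := by
  induction hb with
  | nil => exact ⟨[], 0, fun st tot h => ⟨by simp [rsLoop], by simpa using h⟩⟩
  | cons d p q base hd1 hd2 hb ih =>
    obtain ⟨T, S, hTS⟩ := ih
    refine ⟨d :: ((if p ≤ q then List.replicate (q - p) c2 else List.replicate (p - q) c1) ++ T),
            S + ((min p q : Nat) : Int) * lo, ?_⟩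
    intro st tot h
    have hrev : (d :: (List.replicate p c1 ++ List.replicate q c2 ++ base)).reverse
        = base.reverse ++ (List.replicate q c2 ++ (List.replicate p c1 ++ [d])) := by
      simp [List.reverse_append, List.append_assoc]
    rw [hrev, rs_append]
    obtain ⟨h1, h2⟩ := hTS st tot h
    rw [h1]
    rw [rs2_pushrep c1 c2 lo (Ne.symm h12) q]
    rw [rs2_consume c1 c2 lo h12 p q [d] (T ++ st) (tot + S) h2]
    rw [rs_push_step c2 c1 d lo hd1]
    refine ⟨?_, by simp [hd2]⟩
    simp [rsLoop, List.append_assoc, add_assoc]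


-- score of the low pass over base.reverse followed by a trailing block (and optional barrier)
lemma rs2_block (c1 c2 : Char) (lo : Int) (h12 : c1 ≠ c2) {base : List Char}
    (hb : Good c1 c2 base) (p q : Nat) (tail : List Char) :
    (rsLoop (String.ofList [c2, c1]) lo
        (base.reverse ++ (List.replicate q c2 ++ (List.replicate p c1 ++ tail))) [] 0)
      = rsLoop (String.ofList [c2, c1]) lo tail
          ((if p ≤ q then List.replicate (q - p) c2 else List.replicate (p - q) c1)
             ++ ((rs2_base c1 c2 lo h12 hb).choose ++ []))
          ((rsLoop (String.ofList [c2, c1]) lo base.reverse [] 0).2 + ((min p q : Nat) : Int) * lo) := by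
  obtain ⟨S, hTS⟩ := (rs2_base c1 c2 lo h12 hb).choose_spec
  obtain ⟨h1, h2⟩ := hTS [] 0 (by simp)
  rw [rs_append, h1]
  rw [rs2_pushrep c1 c2 lo (Ne.symm h12) q]
  rw [rs2_consume c1 c2 lo h12 p q tail _ (0 + S) h2]

lemma main_inv (c1 c2 : Char) (hi lo : Int) (h12 : c1 ≠ c2) :
    ∀ (t : List Char) (p q : Nat) (base : List Char) (scA : Int), Good c1 c2 base →
    (rsLoop (String.ofList [c1, c2]) hi t
        (List.replicate p c1 ++ List.replicate q c2 ++ base) scA).2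
      + (rsLoop (String.ofList [c2, c1]) lo
          (rsLoop (String.ofList [c1, c2]) hi t
            (List.replicate p c1 ++ List.replicate q c2 ++ base) scA).1.reverse [] 0).2
    = bLoop c1 c2 hi lo t p q
        (scA + (rsLoop (String.ofList [c2, c1]) lo base.reverse [] 0).2) := by
  intro t
  induction t with
  | nil =>
    intro p q base scA hb
    simp only [rsLoop]
    have hrev : (List.replicate p c1 ++ List.replicate q c2 ++ base).reverse
        = base.reverse ++ (List.replicate q c2 ++ (List.replicate p c1 ++ [])) := by
      simp [List.reverse_append, List.append_assoc]
    rw [hrev, rs2_block c1 c2 lo h12 hb p q []]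
    simp only [rsLoop, bLoop]
    push_cast
    ring
  | cons ch t ih =>
    intro p q base scA hb
    by_cases hc1 : ch = c1
    · rw [hc1]
      rw [rs_push_step c1 c2 c1 hi h12]
      have hr : c1 :: (List.replicate p c1 ++ List.replicate q c2 ++ base)
          = List.replicate (p + 1) c1 ++ List.replicate q c2 ++ base := by
        rw [List.replicate_succ, List.cons_append, List.cons_append]
      rw [hr, ih (p + 1) q base scA hb]
      simp [bLoop]
    · by_cases hc2 : ch = c2
      · rw [hc2]
        cases p with
        | succ n =>
          have hr : List.replicate (n + 1) c1 ++ List.replicate q c2 ++ base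
              = c1 :: (List.replicate n c1 ++ List.replicate q c2 ++ base) := by
            rw [List.replicate_succ, List.cons_append, List.cons_append]
          rw [hr, rs_pop_step c1 c2 hi, ih n q base (scA + hi) hb]
          have hbl : bLoop c1 c2 hi lo (c2 :: t) (n + 1) q
                (scA + (rsLoop (String.ofList [c2, c1]) lo base.reverse [] 0).2)
              = bLoop c1 c2 hi lo t n q
                (scA + (rsLoop (String.ofList [c2, c1]) lo base.reverse [] 0).2 + hi) := by
            simp [bLoop, Ne.symm h12]
          rw [hbl]
          congr 1
          ring
        | zero =>
          have hh : (List.replicate q c2 ++ base).head? ≠ some c1 := by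
            cases q with
            | succ m => simp [List.replicate_succ, Ne.symm h12]
            | zero =>
              cases hb with
              | nil => simp
              | cons d p' q' base' hd1 hd2 hb' => simp [hd1]
          rw [List.replicate_zero, List.nil_append]
          rw [rs_push_step2 c1 c2 c2 hi t _ scA hh]
          have hr : c2 :: (List.replicate q c2 ++ base)
              = List.replicate 0 c1 ++ List.replicate (q + 1) c2 ++ base := by
            rw [List.replicate_zero, List.nil_append, List.replicate_succ, List.cons_append]
          rw [hr, ih 0 (q + 1) base scA hb]
          simp [bLoop, Ne.symm h12]
      · rw [rs_push_step c1 c2 ch hi hc2]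
        have hb' : Good c1 c2 (ch :: (List.replicate p c1 ++ List.replicate q c2 ++ base)) :=
          Good.cons ch p q base hc1 hc2 hb
        have hih := ih 0 0 _ scA hb'
        simp only [List.replicate_zero, List.nil_append] at hih
        rw [hih]
        have hrev : (ch :: (List.replicate p c1 ++ List.replicate q c2 ++ base)).reverse
            = base.reverse ++ (List.replicate q c2 ++ (List.replicate p c1 ++ [ch])) := by
          simp [List.reverse_append, List.append_assoc]
        rw [hrev, rs2_block c1 c2 lo h12 hb p q [ch], rs_push_step c2 c1 ch lo hc1]
        have hbl : bLoop c1 c2 hi lo (ch :: t) p q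
              (scA + (rsLoop (String.ofList [c2, c1]) lo base.reverse [] 0).2)
            = bLoop c1 c2 hi lo t 0 0
              (scA + (rsLoop (String.ofList [c2, c1]) lo base.reverse [] 0).2
                 + (min p q : Int) * lo) := by
          simp [bLoop, hc1, hc2]
        rw [hbl]
        simp only [rsLoop]
        congr 1
        push_cast
        ring

theorem max_score_from_removing_substrings_spec : Claim_equal_max_score_from_removing_substrings := by
  intro s x y _
  unfold Spec_max_score_from_removing_substrings
  unfold max_score_from_removing_substrings max_score_from_removing_substrings_alt removeSubstrings
  by_cases hxy : x ≥ y
  · simp only [if_pos hxy]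
    have h := main_inv 'a' 'b' x y (by decide) s.toList 0 0 [] 0 Good.nil
    simp only [List.replicate_zero, List.nil_append, List.append_nil, List.reverse_nil] at h
    simpa [rsLoop] using h
  · simp only [if_neg hxy]
    have h := main_inv 'b' 'a' y x (by decide) s.toList 0 0 [] 0 Good.nil
    simp only [List.replicate_zero, List.nil_append, List.append_nil, List.reverse_nil] at h
    rw [add_comm]
    simpa [rsLoop] using h
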